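-- pv_equiv track=rewrite | github.com/S222em/basecamp | Week5/Problem3/main.py | check_triangle
-- ===== SOURCE A (Python) =====
-- def check_triangle(side_a, side_b, side_c):
--     sides = [side_a, side_b, side_c]
--
--     for i, side_i in enumerate(sides):
--         sum_of_other_sides = 0
--         for j, side_j in enumerate(sides):
--             if i == j:
--                 continue
--
--             sum_of_other_sides += side_j
--
--         if side_i >= sum_of_other_sides:
--             return False
--
--     return True
-- ===== SOURCE B (Python) =====
-- def check_triangle(side_a, side_b, side_c):
--     total = side_a + side_b + side_c
--     m = max(side_a, side_b, side_c)
--     return 2 * m < total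
-- ===== Notes on version B (the rewrite author's own statement) =====
-- stated objective: simpler
-- what changed: Replaces the nested enumerate loops (re-summing the other two sides per side) with a single closed-form test 2*max < perimeter.
import Mathlib
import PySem

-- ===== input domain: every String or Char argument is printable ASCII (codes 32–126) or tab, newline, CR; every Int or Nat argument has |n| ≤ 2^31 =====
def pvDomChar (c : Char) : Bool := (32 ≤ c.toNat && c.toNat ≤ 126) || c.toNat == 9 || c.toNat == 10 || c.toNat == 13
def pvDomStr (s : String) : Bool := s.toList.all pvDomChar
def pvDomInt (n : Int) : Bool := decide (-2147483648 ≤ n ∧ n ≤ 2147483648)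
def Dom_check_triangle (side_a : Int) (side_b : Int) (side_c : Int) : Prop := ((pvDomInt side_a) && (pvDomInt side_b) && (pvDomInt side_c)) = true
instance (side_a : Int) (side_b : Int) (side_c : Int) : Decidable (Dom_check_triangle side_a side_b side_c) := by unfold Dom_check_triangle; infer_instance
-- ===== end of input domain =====

-- ===== PORT A =====
-- literal transliteration of A: outer loop over enumerate(sides), inner loop re-sums the other sides
def ctSumOthers (i : Int) (sides : List Int) : Int :=
  (PySem.List.enumerate sides).foldl (fun acc p => if i == p.1 then acc else acc + p.2) 0

def ctLoop (sides : List Int) : List (Int × Int) → Bool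
  | [] => true
  | (i, side_i) :: rest =>
    if side_i ≥ ctSumOthers i sides then false else ctLoop sides rest

def check_triangle (side_a : Int) (side_b : Int) (side_c : Int) : Bool :=
  let sides := [side_a, side_b, side_c]
  ctLoop sides (PySem.List.enumerate sides)

-- ===== PORT B =====
-- B: closed form — twice the largest side less than the perimeter
def check_triangle_alt (side_a : Int) (side_b : Int) (side_c : Int) : Bool :=
  let total := side_a + side_b + side_c
  let m := max side_a (max side_b side_c)
  decide (2 * m < total)

-- ===== PRECONDITION & SPEC =====
def Spec_check_triangle (side_a : Int) (side_b : Int) (side_c : Int) (out : Bool) : Prop := out = check_triangle_alt side_a side_b side_c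
instance (side_a : Int) (side_b : Int) (side_c : Int) (out : Bool) : Decidable (Spec_check_triangle side_a side_b side_c out) := by unfold Spec_check_triangle; infer_instance

-- ===== CLAIM (what is proved, stated in full; the proofs are below) =====
def Claim_equal_check_triangle : Prop := ∀ (side_a : Int) (side_b : Int) (side_c : Int), Dom_check_triangle side_a side_b side_c → Spec_check_triangle side_a side_b side_c (check_triangle side_a side_b side_c)

-- ===== LEMMAS AND PROOFS =====

-- ===== VERDICT (by name: the statement is the Claim_ definition above) =====
theorem check_triangle_spec : Claim_equal_check_triangle := by
  intro a b c _
  unfold Spec_check_triangle check_triangle check_triangle_alt ctLoop ctSumOthers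
  simp only [ctLoop, ctSumOthers, PySem.List.enumerate_cons, PySem.List.enumerate_nil,
    List.foldl]
  rw [Bool.eq_iff_iff]
  simp [max_def]
  split_ifs <;> omega
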